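-- pv_equiv track=rewrite | github.com/sebastianspicker/outlook-email-rag | src/html_converter.py | looks_like_html
-- ===== SOURCE A (Python) =====
-- def looks_like_html(text: str) -> bool:
--     """Detect whether a string contains HTML markup.
--
--     OLM sometimes puts HTML content in the 'plain text' body field.
--     This catches those cases so we can route them through html_to_text().
--     """
--     if not text:
--         return False
--     # Quick check for common HTML indicators
--     lowered = text[:2000].lower()  # only check the beginning for speed
--     html_indicators = (
--         "<!doctype",
--         "<html",
--         "<head",
--         "<body",
--         "<div",
--         "<table",
--         "<style",
--         "<p>",
--         "<p ",
--         "<br>",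
--         "<br/",
--         "<br ",
--         "<span",
--     )
--     return any(tag in lowered for tag in html_indicators)
-- ===== SOURCE B (Python) =====
-- def _is_tag_start(s: str, j: int) -> bool:
--     """Decision tree keyed on the first character after '<'."""
--     c = s[j:j+1]
--     if c == "!":
--         return s.startswith("doctype", j + 1)
--     if c == "h":
--         return s.startswith("tml", j + 1) or s.startswith("ead", j + 1)
--     if c == "b":
--         return s.startswith("ody", j + 1) or (
--             s.startswith("r", j + 1) and s[j+2:j+3] in (">", "/", " ")
--         )
--     if c == "d":
--         return s.startswith("iv", j + 1)
--     if c == "t":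
--         return s.startswith("able", j + 1)
--     if c == "s":
--         return s.startswith("tyle", j + 1) or s.startswith("pan", j + 1)
--     if c == "p":
--         return s[j+1:j+2] in (">", " ")
--     return False
--
--
-- def looks_like_html(text: str) -> bool:
--     lowered = text[:2000].lower()
--     i = 0
--     while True:
--         i = lowered.find("<", i)
--         if i == -1:
--             return False
--         if _is_tag_start(lowered, i + 1):
--             return True
--         i += 1
-- ===== Notes on version B (the rewrite author's own statement) =====
-- stated objective: alternative
-- what changed: Replaces A's 13 independent whole-prefix substring scans with a single find-next-opening-bracket loop that, at each bracket, runs a hand-written decision tree dispatching on the first character after the bracket.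
import Mathlib
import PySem

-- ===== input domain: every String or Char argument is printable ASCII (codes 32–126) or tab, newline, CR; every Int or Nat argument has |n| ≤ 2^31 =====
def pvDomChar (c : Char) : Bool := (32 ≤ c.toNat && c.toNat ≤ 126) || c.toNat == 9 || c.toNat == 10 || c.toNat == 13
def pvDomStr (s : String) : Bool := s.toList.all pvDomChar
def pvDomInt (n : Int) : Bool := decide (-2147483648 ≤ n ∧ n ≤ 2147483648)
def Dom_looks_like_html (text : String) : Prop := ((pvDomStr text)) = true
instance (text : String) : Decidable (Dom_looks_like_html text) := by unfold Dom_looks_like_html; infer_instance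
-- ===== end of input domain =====

-- B replaces A's 13 independent whole-prefix substring scans by one find('<') loop with a
-- hand-written decision tree keyed on the first character after '<' (objective: alternative;
-- return value proved equal).

-- ===== PORT A =====
def pvTags : List (List Char) :=
  ["<!doctype".toList, "<html".toList, "<head".toList, "<body".toList, "<div".toList,
   "<table".toList, "<style".toList, "<p>".toList, "<p ".toList, "<br>".toList,
   "<br/".toList, "<br ".toList, "<span".toList]

def looks_like_html (text : String) : Bool :=
  if text.toList = [] then false
  else
    let lowered := PySem.Chars.lower (PySem.Chars.slice text.toList none (some 2000))
    pvTags.any (fun tag => PySem.Chars.isIn tag lowered)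

-- ===== PORT B =====
-- s.startswith(lit, j) on the remainder list
def pvPre (s : String) (r : List Char) : Bool := s.toList.isPrefixOf r

-- s[j+2:j+3] in (">", "/", " ")  — the char two past the '<', if any
def pvBrEnd : List Char → Bool
  | _ :: d :: _ => d = '>' || d = '/' || d = ' '
  | _ => false

-- s[j+1:j+2] in (">", " ")  — the char right after "<p", if any
def pvPEnd : List Char → Bool
  | d :: _ => d = '>' || d = ' '
  | _ => false

-- _is_tag_start: decision tree on the first character after '<' (l = chars after '<')
def pvIsTag : List Char → Bool
  | [] => false
  | c :: r =>
    if c = '!' then pvPre "doctype" r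
    else if c = 'h' then pvPre "tml" r || pvPre "ead" r
    else if c = 'b' then pvPre "ody" r || (pvPre "r" r && pvBrEnd r)
    else if c = 'd' then pvPre "iv" r
    else if c = 't' then pvPre "able" r
    else if c = 's' then pvPre "tyle" r || pvPre "pan" r
    else if c = 'p' then pvPEnd r
    else false

-- the while/find loop of Source B: advance to the next '<', test the decision tree there,
-- on failure resume the search one position further (= keep scanning the rest)
def pvFind : List Char → Bool
  | [] => false
  | c :: r => if c = '<' then (pvIsTag r || pvFind r) else pvFind r

def looks_like_html_alt (text : String) : Bool :=
  pvFind (PySem.Chars.lower (PySem.Chars.slice text.toList none (some 2000)))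

-- ===== PRECONDITION & SPEC =====
def Spec_looks_like_html (text : String) (out : Bool) : Prop := out = looks_like_html_alt text
instance (text : String) (out : Bool) : Decidable (Spec_looks_like_html text out) := by unfold Spec_looks_like_html; infer_instance

-- ===== CLAIM (what is proved, stated in full; the proofs are below) =====
def Claim_equal_looks_like_html : Prop := ∀ (text : String), Dom_looks_like_html text → Spec_looks_like_html text (looks_like_html text)

-- ===== LEMMAS AND PROOFS =====
-- proof-only: the tags with their leading '<' stripped
def pvProofTails : List (List Char) := pvTags.map List.tail

theorem pvTags_eq_map : pvTags = pvProofTails.map (fun s => '<' :: s) := by decide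

theorem pvBr_lemma (r : List Char) : (pvPre "r" r && pvBrEnd r) =
    (List.isPrefixOf ['r','>'] r || List.isPrefixOf ['r','/'] r || List.isPrefixOf ['r',' '] r) := by
  match r with
  | [] => decide
  | [d] => simp [pvPre, pvBrEnd, List.isPrefixOf]
  | d :: e :: r' =>
    rw [Bool.eq_iff_iff]
    simp [pvPre, pvBrEnd, List.isPrefixOf]
    tauto

theorem pvP_lemma (r : List Char) : pvPEnd r =
    (List.isPrefixOf ['>'] r || List.isPrefixOf [' '] r) := by
  match r with
  | [] => decide
  | d :: r' =>
    rw [Bool.eq_iff_iff]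
    simp [pvPEnd, List.isPrefixOf]
    tauto

-- the decision tree is exactly "some stripped tag is a prefix"
theorem pvIsTag_eq (l : List Char) :
    pvIsTag l = pvProofTails.any (fun s => s.isPrefixOf l) := by
  match l with
  | [] => decide
  | c :: r =>
    simp only [pvIsTag, pvProofTails, pvTags, List.any, List.map]
    rw [pvBr_lemma, pvP_lemma, Bool.eq_iff_iff]
    by_cases h1 : c = '!' <;> by_cases h2 : c = 'h' <;> by_cases h3 : c = 'b' <;>
      by_cases h4 : c = 'd' <;> by_cases h5 : c = 't' <;> by_cases h6 : c = 's' <;>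
      by_cases h7 : c = 'p' <;>
      simp_all [pvPre, List.isPrefixOf] <;> tauto

theorem pvFind_iff (l : List Char) :
    pvFind l = true ↔ ∃ s ∈ pvProofTails, ('<' :: s) <:+: l := by
  induction l with
  | nil => simp [pvFind]
  | cons c rest ih =>
    by_cases hc : c = '<'
    · subst hc
      have hstep : pvFind ('<' :: rest) = (pvIsTag rest || pvFind rest) := by
        simp [pvFind]
      rw [hstep, Bool.or_eq_true, pvIsTag_eq, List.any_eq_true]
      simp only [List.isPrefixOf_iff_prefix, ih]
      constructor
      · rintro (⟨s, hs, hp⟩ | ⟨s, hs, hi⟩)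
        · exact ⟨s, hs, List.infix_cons_iff.mpr (Or.inl (List.cons_prefix_cons.mpr ⟨rfl, hp⟩))⟩
        · exact ⟨s, hs, List.infix_cons_iff.mpr (Or.inr hi)⟩
      · rintro ⟨s, hs, hi⟩
        rcases List.infix_cons_iff.mp hi with hp | hi
        · rcases List.cons_prefix_cons.mp hp with ⟨_, hp⟩
          exact Or.inl ⟨s, hs, hp⟩
        · exact Or.inr ⟨s, hs, hi⟩
    · have hstep : pvFind (c :: rest) = pvFind rest := by
        simp [pvFind, hc]
      rw [hstep, ih]
      constructor
      · rintro ⟨s, hs, hi⟩; exact ⟨s, hs, List.infix_cons_iff.mpr (Or.inr hi)⟩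
      · rintro ⟨s, hs, hi⟩
        rcases List.infix_cons_iff.mp hi with hp | hi
        · exact absurd (List.cons_prefix_cons.mp hp).1.symm hc
        · exact ⟨s, hs, hi⟩

theorem pvAny_iff (l : List Char) :
    (pvTags.any (fun tag => PySem.Chars.isIn tag l)) = true ↔
      ∃ s ∈ pvProofTails, ('<' :: s) <:+: l := by
  simp [pvTags_eq_map, List.any_eq_true, PySem.Chars.isIn_iff_infix]

-- ===== VERDICT (by name: the statement is the Claim_ definition above) =====
theorem looks_like_html_spec : Claim_equal_looks_like_html := by
  intro text _
  unfold Spec_looks_like_html looks_like_html looks_like_html_alt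
  by_cases h : text.toList = []
  · simp [h, pvFind, PySem.Chars.slice, PySem.Chars.lower, PySem.List.slice]
  · simp only [h, if_false]
    rw [Bool.eq_iff_iff, pvAny_iff, pvFind_iff]
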